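-- pv_equiv track=rewrite | github.com/koii-network/prometheus-beta | src/odd_frequency.py | find_odd_frequency_number
-- ===== SOURCE A (Python) =====
-- def find_odd_frequency_number(numbers):
--     """
--     Find the smallest number that appears an odd number of times using bitwise XOR.
--
--     Args:
--         numbers (list): A list of integers
--
--     Returns:
--         int: The smallest number that appears an odd number of times
--
--     Raises:
--         ValueError: If no number appears an odd number of times
--     """
--     # If the list is empty, raise an error
--     if not numbers:
--         raise ValueError("Input list cannot be empty")
--
--     # Use a set to track numbers with odd frequencies
--     odd_frequency_numbers = set()
--
--     # Iterate through the numbers to find odd frequency numbers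
--     for num in numbers:
--         # Use XOR to toggle tracking of odd/even occurrences
--         if num in odd_frequency_numbers:
--             odd_frequency_numbers.remove(num)
--         else:
--             odd_frequency_numbers.add(num)
--
--     # If no odd frequency numbers found, raise an error
--     if not odd_frequency_numbers:
--         raise ValueError("No number appears an odd number of times")
--
--     # Return the smallest number with odd frequency
--     return min(odd_frequency_numbers)
-- ===== SOURCE B (Python) =====
-- def find_odd_frequency_number(numbers):
--     """Smallest number appearing an odd number of times (full frequency table, then filter)."""
--     if not numbers:
--         raise ValueError("Input list cannot be empty")
--     counts = {}
--     for num in numbers: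
--         counts[num] = counts.get(num, 0) + 1
--     odd_keys = [k for k, c in counts.items() if c % 2 == 1]
--     if not odd_keys:
--         raise ValueError("No number appears an odd number of times")
--     return min(odd_keys)
-- ===== Notes on version B (the rewrite author's own statement) =====
-- stated objective: simpler
-- what changed: B builds a complete frequency dictionary in one pass and then selects the odd-count keys in a separate filtering pass, instead of A's parity-toggled set maintained during the scan.
import Mathlib
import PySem

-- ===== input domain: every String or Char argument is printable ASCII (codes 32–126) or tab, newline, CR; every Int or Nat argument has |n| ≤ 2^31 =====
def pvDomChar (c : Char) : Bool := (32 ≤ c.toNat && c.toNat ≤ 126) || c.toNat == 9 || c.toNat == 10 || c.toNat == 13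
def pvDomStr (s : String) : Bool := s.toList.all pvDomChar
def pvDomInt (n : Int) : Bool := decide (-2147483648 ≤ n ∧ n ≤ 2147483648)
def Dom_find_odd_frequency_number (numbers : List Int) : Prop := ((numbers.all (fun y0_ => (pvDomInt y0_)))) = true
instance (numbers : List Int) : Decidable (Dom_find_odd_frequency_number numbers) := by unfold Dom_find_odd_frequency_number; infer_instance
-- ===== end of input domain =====

-- B replaces A's parity-toggled set with a full frequency dictionary plus a separate
-- odd-count filtering pass (objective: simpler).

-- ===== PORT A =====
-- A: toggle membership of each number in a set; return min of the set.
def find_odd_frequency_number (numbers : List Int) : Int :=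
  let odd_frequency_numbers : PySem.Set Int :=
    numbers.foldl
      (fun s num =>
        if PySem.Set.contains s num then PySem.Set.discard s num
        else PySem.Set.add s num)
      PySem.Set.empty
  (PySem.List.min? odd_frequency_numbers (fun x => x)).getD 0

-- ===== PORT B =====
-- B: count every element into a dict, then take min of the keys with odd count.
def find_odd_frequency_number_alt (numbers : List Int) : Int :=
  let counts : PySem.Dict Int Int :=
    numbers.foldl (fun d num => d.insert num (d.getD num 0 + 1)) PySem.Dict.empty
  let odd_keys : List Int :=
    (counts.items.filter (fun kv => PySem.Int.mod kv.2 2 == 1)).map (fun kv => kv.1)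
  (PySem.List.min? odd_keys (fun x => x)).getD 0

-- ===== PRECONDITION & SPEC =====
-- Pre_ excludes exactly the inputs where A raises ValueError: the empty list, and
-- lists in which no number occurs an odd number of times.
def Pre_find_odd_frequency_number (numbers : List Int) : Prop :=
  numbers ≠ [] ∧ ∃ x ∈ numbers, numbers.count x % 2 = 1
instance (numbers : List Int) : Decidable (Pre_find_odd_frequency_number numbers) := by
  unfold Pre_find_odd_frequency_number; infer_instance
def pvWitness_find_odd_frequency_number : List Int := [3, 1, 3, 3]

def Spec_find_odd_frequency_number (numbers : List Int) (out : Int) : Prop := out = find_odd_frequency_number_alt numbers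
instance (numbers : List Int) (out : Int) : Decidable (Spec_find_odd_frequency_number numbers out) := by unfold Spec_find_odd_frequency_number; infer_instance

-- ===== CLAIM (what is proved, stated in full; the proofs are below) =====
def Claim_equal_find_odd_frequency_number : Prop := ∀ (numbers : List Int), Dom_find_odd_frequency_number numbers → Pre_find_odd_frequency_number numbers → Spec_find_odd_frequency_number numbers (find_odd_frequency_number numbers)

-- ===== LEMMAS AND PROOFS =====

-- One toggle step flips membership of exactly the toggled element.
theorem toggle_step_mem (s : PySem.Set Int) (num x : Int) :
    (x ∈ (if PySem.Set.contains s num then PySem.Set.discard s num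
          else PySem.Set.add s num)) ↔ (if x = num then x ∉ s else x ∈ s) := by
  by_cases hc : PySem.Set.contains s num
  · simp only [hc, if_true, PySem.Set.discard, List.mem_filter]
    by_cases hx : x = num
    · subst hx
      simp only [PySem.Set.contains] at hc
      rw [List.contains_iff_mem] at hc
      simp [hc]
    · simp [hx]
  · simp only [PySem.Set.contains] at hc
    simp only [PySem.Set.contains, PySem.Set.add, hc, if_false, Bool.false_eq_true,
      List.mem_append, List.mem_singleton]
    rw [List.contains_iff_mem] at hc
    by_cases hx : x = num
    · subst hx; simp [hc]
    · simp [hx]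

-- Invariant of A's scan: x is in the final set iff its parity flipped an odd number of times.
theorem toggle_fold_mem (l : List Int) (s : PySem.Set Int) (x : Int) :
    (x ∈ l.foldl
      (fun s num =>
        if PySem.Set.contains s num then PySem.Set.discard s num
        else PySem.Set.add s num) s) ↔
    (if l.count x % 2 = 1 then x ∉ s else x ∈ s) := by
  induction l generalizing s with
  | nil => simp
  | cons a t ih =>
    rw [List.foldl_cons, ih]
    by_cases hx : x = a
    · subst hx
      have hm : (x ∈ (if PySem.Set.contains s x then PySem.Set.discard s x
          else PySem.Set.add s x)) ↔ x ∉ s := by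
        rw [toggle_step_mem]; simp
      rw [List.count_cons_self]
      by_cases h : t.count x % 2 = 1
      · have h1 : ¬ ((t.count x + 1) % 2 = 1) := by omega
        simp only [h, if_true, h1, if_false, hm, not_not]
      · have h1 : (t.count x + 1) % 2 = 1 := by omega
        simp only [h, if_false, h1, if_true, hm]
    · have hm : (x ∈ (if PySem.Set.contains s a then PySem.Set.discard s a
          else PySem.Set.add s a)) ↔ x ∈ s := by
        rw [toggle_step_mem]; simp [hx]
      have hax : ¬ (a = x) := fun h => hx h.symm
      have hc : List.count x (a :: t) = List.count x t := by
        simp [hax]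
      rw [hc]
      split <;> simp_all

-- B's odd-key list has the same members as A's final set.
theorem odd_keys_mem (numbers : List Int) (x : Int) :
    (x ∈ ((numbers.foldl (fun d num => d.insert num (d.getD num 0 + 1)) PySem.Dict.empty).items.filter
            (fun kv => PySem.Int.mod kv.2 2 == 1)).map (fun kv => kv.1)) ↔
    (x ∈ numbers ∧ numbers.count x % 2 = 1) := by
  have hcounter : (numbers.foldl (fun d num => d.insert num (d.getD num 0 + 1)) PySem.Dict.empty)
      = PySem.Dict.counter numbers := rfl
  rw [hcounter, List.mem_map]
  have h2 : (0:Int) < 2 := by norm_num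
  constructor
  · rintro ⟨kv, hkv, hfst⟩
    rw [List.mem_filter] at hkv
    obtain ⟨hmem, hodd⟩ := hkv
    rw [PySem.Dict.items_counter, List.mem_map] at hmem
    obtain ⟨k, hk, hpair⟩ := hmem
    subst hpair
    have hkx : k = x := hfst
    subst hkx
    refine ⟨(PySem.Set.mem_ofList numbers k).mp hk, ?_⟩
    simp only [beq_iff_eq, PySem.Int.mod_eq_emod_of_pos h2] at hodd
    omega
  · rintro ⟨hx, hodd⟩
    refine ⟨(x, (numbers.count x : Int)), ?_, rfl⟩
    rw [List.mem_filter, PySem.Dict.items_counter, List.mem_map]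
    refine ⟨⟨x, (PySem.Set.mem_ofList numbers x).mpr hx, rfl⟩, ?_⟩
    simp only [beq_iff_eq, PySem.Int.mod_eq_emod_of_pos h2]
    omega

-- min? over Int with identity key is determined by membership alone.
theorem min?_getD_eq_of_mem_iff (l1 l2 : List Int)
    (h : ∀ x, x ∈ l1 ↔ x ∈ l2) :
    (PySem.List.min? l1 (fun x => x)).getD 0 = (PySem.List.min? l2 (fun x => x)).getD 0 := by
  cases h1 : PySem.List.min? l1 (fun x : Int => x) with
  | none =>
    rw [PySem.List.min?_eq_none_iff] at h1
    subst h1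
    have : l2 = [] := List.eq_nil_iff_forall_not_mem.mpr (fun x hx => by rw [← h x] at hx; simp at hx)
    subst this; rfl
  | some m1 =>
    have hm1 : m1 ∈ l2 := (h m1).mp (PySem.List.min?_mem h1)
    cases h2 : PySem.List.min? l2 (fun x : Int => x) with
    | none =>
      rw [PySem.List.min?_eq_none_iff] at h2
      subst h2; simp at hm1
    | some m2 =>
      have hm2 : m2 ∈ l1 := (h m2).mpr (PySem.List.min?_mem h2)
      have le1 : m2 ≤ m1 := PySem.List.min?_isMin h2 m1 hm1
      have le2 : m1 ≤ m2 := PySem.List.min?_isMin h1 m2 hm2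
      have : m1 = m2 := le_antisymm le2 le1
      simp [this]

-- ===== VERDICT (by name: the statement is the Claim_ definition above) =====
theorem find_odd_frequency_number_spec : Claim_equal_find_odd_frequency_number := by
  intro numbers _ _
  unfold Spec_find_odd_frequency_number find_odd_frequency_number find_odd_frequency_number_alt
  apply min?_getD_eq_of_mem_iff
  intro x
  rw [toggle_fold_mem, odd_keys_mem]
  by_cases hodd : numbers.count x % 2 = 1
  · simp only [hodd, if_true]
    have hx : x ∈ numbers := by
      by_contra hnx
      rw [List.count_eq_zero_of_not_mem hnx] at hodd
      omega
    simp [PySem.Set.empty, hx]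
  · simp [hodd, PySem.Set.empty]
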